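-- pv_equiv track=rewrite | github.com/jconnelly/micro-agent-development | Utils/text_processing.py | find_common_prefixes
-- ===== SOURCE A (Python) =====
-- from typing import Any, Dict, List, Tuple, Union, Optional
--
-- def find_common_prefixes(texts: List[str], min_length: int = 3) -> List[str]:
--     """
--     Find common prefixes among a list of texts.
--
--     Args:
--         texts: List of text strings
--         min_length: Minimum prefix length to consider
--
--     Returns:
--         List of common prefixes found
--     """
--     if len(texts) < 2:
--         return []
--
--     prefixes = set()
--
--     for i, text1 in enumerate(texts):
--         for text2 in texts[i+1:]:
--             # Find longest common prefix
--             common_len = 0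
--             for j in range(min(len(text1), len(text2))):
--                 if text1[j] == text2[j]:
--                     common_len += 1
--                 else:
--                     break
--
--             if common_len >= min_length:
--                 prefixes.add(text1[:common_len])
--
--     return sorted(list(prefixes), key=len, reverse=True)
-- ===== SOURCE B (Python) =====
-- from typing import List
--
--
-- def _lcp(a: str, b: str) -> str:
--     p = []
--     for c1, c2 in zip(a, b):
--         if c1 != c2:
--             break
--         p.append(c1)
--     return ''.join(p)
--
--
-- def find_common_prefixes(texts: List[str], min_length: int = 3) -> List[str]:
--     if len(texts) < 2:
--         return []
--
--     ordered = sorted(texts)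
--     prefixes = set()
--     for a, b in zip(ordered, ordered[1:]):
--         p = _lcp(a, b)
--         if len(p) >= min_length:
--             prefixes.add(p)
--
--     return sorted(prefixes, key=len, reverse=True)
-- ===== Notes on version B (the rewrite author's own statement) =====
-- stated objective: faster
-- what changed: Instead of intersecting all O(n^2) pairs of strings, B sorts the list once and collects only the n-1 adjacent-pair common prefixes, which form exactly the same set of pairwise common prefixes.
-- outside the precondition, e.g. on find_common_prefixes(['ax', 'ay', 'bx', 'by'], 1): A returns ['a', 'b'], B returns ['a', 'b']
import Mathlib
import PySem

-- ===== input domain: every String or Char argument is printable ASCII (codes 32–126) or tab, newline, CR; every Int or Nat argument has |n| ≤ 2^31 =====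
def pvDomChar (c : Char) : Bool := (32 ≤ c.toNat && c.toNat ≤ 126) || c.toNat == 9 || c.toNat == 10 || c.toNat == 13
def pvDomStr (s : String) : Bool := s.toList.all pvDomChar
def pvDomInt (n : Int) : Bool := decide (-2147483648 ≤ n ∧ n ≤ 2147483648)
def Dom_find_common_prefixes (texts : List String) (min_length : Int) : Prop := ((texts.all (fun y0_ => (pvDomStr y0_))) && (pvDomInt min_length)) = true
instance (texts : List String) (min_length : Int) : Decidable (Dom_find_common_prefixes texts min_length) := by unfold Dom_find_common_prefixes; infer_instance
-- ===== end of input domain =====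

-- B sorts the list once and collects only adjacent-pair common prefixes (the same set as all pairwise
-- common prefixes), replacing A's all-pairs scan; objective: faster.

-- ===== PORT A =====
-- inner loop 'for j in range(min(len,len)): if t1[j]==t2[j]: common_len += 1 else: break'
def pvCommonLen (c1 c2 : List Char) : Nat :=
  match c1, c2 with
  | a :: r1, b :: r2 => if a = b then pvCommonLen r1 r2 + 1 else 0
  | _, _ => 0

def find_common_prefixes (texts : List String) (min_length : Int) : List String :=
  if texts.length < 2 then []
  else
    let prefixes : PySem.Set String :=
      (PySem.List.enumerate texts 0).foldl (fun acc p =>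
        (PySem.List.slice texts (some (p.1 + 1)) none).foldl (fun acc2 t2 =>
          let cl : Nat := pvCommonLen p.2.toList t2.toList
          if min_length ≤ (cl : Int) then
            PySem.Set.add acc2 (PySem.Str.slice p.2 none (some (cl : Int)))
          else acc2) acc)
        PySem.Set.empty
    PySem.List.sorted prefixes (fun s => PySem.Str.len s) true

-- ===== PORT B =====
-- Source B's _lcp: 'for c1, c2 in zip(a, b): if c1 != c2: break; p.append(c1)', then ''.join(p)
def pvZipLcp (ps : List (Char × Char)) : List Char :=
  match ps with
  | [] => []
  | (c1, c2) :: r => if c1 ≠ c2 then [] else c1 :: pvZipLcp r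

def find_common_prefixes_alt (texts : List String) (min_length : Int) : List String :=
  if texts.length < 2 then []
  else
    let ordered := PySem.List.sorted texts (fun s => s) false
    let prefixes : PySem.Set String :=
      (ordered.zip (PySem.List.slice ordered (some 1) none)).foldl (fun acc ab =>
        let p : String := String.ofList (pvZipLcp (ab.1.toList.zip ab.2.toList))
        if min_length ≤ PySem.Str.len p then PySem.Set.add acc p else acc)
        PySem.Set.empty
    PySem.List.sorted prefixes (fun s => PySem.Str.len s) true

-- ===== PRECONDITION & SPEC =====
-- helpers for Pre_ (independent of both ports; pvLcpChars is the standard structural definition of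
-- 'longest common prefix', a shape condition on the two strings, not a copy of either port's loop)
def pvLcpChars (c1 c2 : List Char) : List Char :=
  match c1, c2 with
  | a :: r1, b :: r2 => if a = b then a :: pvLcpChars r1 r2 else []
  | _, _ => []

def pvLcp (a b : String) : String := String.ofList (pvLcpChars a.toList b.toList)

def pvPairs {α : Type} (xs : List α) : List (α × α) :=
  match xs with
  | [] => []
  | x :: r => r.map (fun y => (x, y)) ++ pvPairs r

-- Pre_ excludes inputs on which two DISTINCT qualifying pairwise common prefixes have the same length:
-- there A sorts with a tied key, so the relative order of the tied prefixes is Python's accidental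
-- set-iteration (hash) order, which no deterministic reimplementation can be required to match.
def Pre_find_common_prefixes (texts : List String) (min_length : Int) : Prop :=
  ∀ p ∈ pvPairs texts, ∀ q ∈ pvPairs texts,
    min_length ≤ PySem.Str.len (pvLcp p.1 p.2) →
    min_length ≤ PySem.Str.len (pvLcp q.1 q.2) →
    PySem.Str.len (pvLcp p.1 p.2) = PySem.Str.len (pvLcp q.1 q.2) →
    pvLcp p.1 p.2 = pvLcp q.1 q.2

instance (texts : List String) (min_length : Int) : Decidable (Pre_find_common_prefixes texts min_length) := by
  unfold Pre_find_common_prefixes; infer_instance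

def pvWitness_find_common_prefixes : List String × Int := (["hello1", "hello2", "world"], 3)

def Spec_find_common_prefixes (texts : List String) (min_length : Int) (out : List String) : Prop := out = find_common_prefixes_alt texts min_length
instance (texts : List String) (min_length : Int) (out : List String) : Decidable (Spec_find_common_prefixes texts min_length out) := by unfold Spec_find_common_prefixes; infer_instance

-- ===== CLAIM (what is proved, stated in full; the proofs are below) =====
def Claim_equal_find_common_prefixes : Prop := ∀ (texts : List String) (min_length : Int), Dom_find_common_prefixes texts min_length → Pre_find_common_prefixes texts min_length → Spec_find_common_prefixes texts min_length (find_common_prefixes texts min_length)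

-- ===== LEMMAS AND PROOFS =====

-- A's inner counting loop counts exactly the length of the common prefix
theorem pvCommonLen_eq_length (c1 c2 : List Char) : pvCommonLen c1 c2 = (pvLcpChars c1 c2).length := by
  induction c1 generalizing c2 with
  | nil => cases c2 <;> simp [pvCommonLen, pvLcpChars]
  | cons a r1 ih =>
    cases c2 with
    | nil => simp [pvCommonLen, pvLcpChars]
    | cons b r2 =>
      by_cases h : a = b <;> simp [pvCommonLen, pvLcpChars, h, ih]

-- t1[:common_len] is the common prefix itself
theorem take_length_lcp (c1 c2 : List Char) : c1.take (pvLcpChars c1 c2).length = pvLcpChars c1 c2 := by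
  induction c1 generalizing c2 with
  | nil => cases c2 <;> simp [pvLcpChars]
  | cons a r1 ih =>
    cases c2 with
    | nil => simp [pvLcpChars]
    | cons b r2 =>
      by_cases h : a = b <;> simp [pvLcpChars, h, ih]

-- B's zip loop computes the same common prefix
theorem pvZipLcp_zip (c1 c2 : List Char) : pvZipLcp (c1.zip c2) = pvLcpChars c1 c2 := by
  induction c1 generalizing c2 with
  | nil => cases c2 <;> simp [pvZipLcp, pvLcpChars]
  | cons a r1 ih =>
    cases c2 with
    | nil => simp [pvZipLcp, pvLcpChars]
    | cons b r2 =>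
      by_cases h : a = b <;> simp [pvZipLcp, pvLcpChars, h, ih]

theorem pvLcpChars_comm (c1 c2 : List Char) : pvLcpChars c1 c2 = pvLcpChars c2 c1 := by
  induction c1 generalizing c2 with
  | nil => cases c2 <;> simp [pvLcpChars]
  | cons a r1 ih =>
    cases c2 with
    | nil => simp [pvLcpChars]
    | cons b r2 =>
      by_cases h : a = b
      · subst h; simp [pvLcpChars, ih]
      · have h' : ¬ b = a := fun hh => h hh.symm
        simp [pvLcpChars, h, h']

theorem pvLcp_comm (a b : String) : pvLcp a b = pvLcp b a := by
  simp [pvLcp, pvLcpChars_comm]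

-- membership in a conditional-add fold
theorem mem_foldl_add_if {β : Type} (f : β → String) (P : β → Prop) [DecidablePred P]
    (l : List β) (s : List String) (y : String) :
    (y ∈ l.foldl (fun acc b => if P b then PySem.Set.add acc (f b) else acc) s) ↔
      y ∈ s ∨ ∃ b ∈ l, P b ∧ y = f b := by
  induction l generalizing s with
  | nil => simp
  | cons x r ih =>
    simp only [List.foldl_cons, ih]
    by_cases h : P x
    · simp only [h, if_pos, PySem.Set.mem_add, List.mem_cons]
      constructor
      · rintro ((hy | hy) | ⟨b, hb, hPb, hy⟩)
        · exact Or.inl hy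
        · exact Or.inr ⟨x, Or.inl rfl, h, hy⟩
        · exact Or.inr ⟨b, Or.inr hb, hPb, hy⟩
      · rintro (hy | ⟨b, rfl | hb, hPb, hy⟩)
        · exact Or.inl (Or.inl hy)
        · exact Or.inl (Or.inr hy)
        · exact Or.inr ⟨b, hb, hPb, hy⟩
    · simp only [h, if_neg, not_false_iff, List.mem_cons]
      constructor
      · rintro (hy | ⟨b, hb, hPb, hy⟩)
        · exact Or.inl hy
        · exact Or.inr ⟨b, Or.inr hb, hPb, hy⟩
      · rintro (hy | ⟨b, rfl | hb, hPb, hy⟩)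
        · exact Or.inl hy
        · exact absurd hPb h
        · exact Or.inr ⟨b, hb, hPb, hy⟩

theorem nodup_foldl_add_if {β : Type} (f : β → String) (P : β → Prop) [DecidablePred P]
    (l : List β) (s : List String) (hs : s.Nodup) :
    (l.foldl (fun acc b => if P b then PySem.Set.add acc (f b) else acc) s).Nodup := by
  induction l generalizing s with
  | nil => simpa
  | cons x r ih =>
    simp only [List.foldl_cons]
    by_cases h : P x
    · simp only [h, if_pos]
      exact ih _ (PySem.Set.nodup_add s (f x) hs)
    · simp only [h, if_neg, not_false_iff]
      exact ih _ hs

theorem mem_pvPairs_cons {α : Type} (x : α) (r : List α) (a b : α) :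
    ((a, b) ∈ pvPairs (x :: r)) ↔ (a = x ∧ b ∈ r) ∨ (a, b) ∈ pvPairs r := by
  simp only [pvPairs, List.mem_append, List.mem_map, Prod.mk.injEq]
  constructor
  · rintro (⟨y, hy, h1, h2⟩ | h)
    · exact Or.inl ⟨h1.symm, h2 ▸ hy⟩
    · exact Or.inr h
  · rintro (⟨rfl, hb⟩ | h)
    · exact Or.inl ⟨b, hb, rfl, rfl⟩
    · exact Or.inr h

-- unordered-pair membership in pvPairs is invariant under permutation
theorem upair_perm {α : Type} {xs ys : List α} (h : xs.Perm ys) (a b : α)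
    (hm : (a, b) ∈ pvPairs xs ∨ (b, a) ∈ pvPairs xs) :
    (a, b) ∈ pvPairs ys ∨ (b, a) ∈ pvPairs ys := by
  induction h with
  | nil => exact hm
  | cons x h ih =>
    rw [mem_pvPairs_cons, mem_pvPairs_cons] at hm ⊢
    rcases hm with (⟨rfl, hb⟩ | hp) | (⟨rfl, ha⟩ | hp)
    · exact Or.inl (Or.inl ⟨rfl, h.subset hb⟩)
    · rcases ih (Or.inl hp) with h' | h'
      · exact Or.inl (Or.inr h')
      · exact Or.inr (Or.inr h')
    · exact Or.inr (Or.inl ⟨rfl, h.subset ha⟩)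
    · rcases ih (Or.inr hp) with h' | h'
      · exact Or.inl (Or.inr h')
      · exact Or.inr (Or.inr h')
  | swap x y l =>
    rw [mem_pvPairs_cons, mem_pvPairs_cons, mem_pvPairs_cons, mem_pvPairs_cons] at hm ⊢
    simp only [List.mem_cons] at hm ⊢
    tauto
  | trans h1 h2 ih1 ih2 => exact ih2 (ih1 hm)

-- adjacent pairs are pairs
theorem zip_tail_subset_pvPairs {α : Type} (l : List α) (p : α × α)
    (hp : p ∈ l.zip l.tail) : p ∈ pvPairs l := by
  induction l with
  | nil => simp at hp
  | cons x r ih =>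
    cases r with
    | nil => simp at hp
    | cons y t =>
      simp only [List.tail_cons, List.zip_cons_cons, List.mem_cons] at hp
      rcases hp with hp | hp
      · subst hp
        simp [pvPairs]
      · obtain ⟨a, b⟩ := p
        rw [mem_pvPairs_cons]
        exact Or.inr (ih hp)

-- string order, restated as a negated lexicographic comparison of the character lists
theorem str_le_lex (s t : String) (h : s ≤ t) : ¬ List.Lex (· < ·) t.toList s.toList := by
  have h' := String.le_iff_toList_le.mp h
  exact fun hlex => not_lt.mpr h' hlex

-- three-point lemma: for a ≤ b ≤ c (lex), lcp a c is lcp a b or lcp b c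
theorem lcp_three (a b c : List Char) (hab : ¬ List.Lex (· < ·) b a) (hbc : ¬ List.Lex (· < ·) c b) :
    pvLcpChars a c = pvLcpChars a b ∨ pvLcpChars a c = pvLcpChars b c := by
  induction a generalizing b c with
  | nil => left; cases b <;> cases c <;> simp [pvLcpChars]
  | cons x a' ih =>
    cases b with
    | nil => exact absurd List.Lex.nil hab
    | cons y b' =>
      cases c with
      | nil => exact absurd List.Lex.nil hbc
      | cons z c' =>
        have hyx : ¬ y < x := fun h => hab (List.Lex.rel h)
        have hzy : ¬ z < y := fun h => hbc (List.Lex.rel h)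
        by_cases hxz : x = z
        · have hxy : x = y := le_antisymm (not_lt.mp hyx) (hxz ▸ not_lt.mp hzy)
          have hyz : y = z := hxy ▸ hxz
          subst hxy; subst hyz
          have hab' : ¬ List.Lex (· < ·) b' a' := fun h => hab (List.Lex.cons h)
          have hbc' : ¬ List.Lex (· < ·) c' b' := fun h => hbc (List.Lex.cons h)
          rcases ih b' c' hab' hbc' with h | h
          · left; simp [pvLcpChars, h]
          · right; simp [pvLcpChars, h]
        · by_cases hxy : x = y
          · have hyz : ¬ y = z := fun h => hxz (hxy.trans h)
            right; simp [pvLcpChars, hxz, hyz]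
          · left; simp [pvLcpChars, hxz, hxy]

-- lcp of the head with any later element appears among adjacent-pair lcps
theorem chain_head (x : String) (r : List String) (hx : ∀ y ∈ r, x ≤ y)
    (hr : r.Pairwise (· ≤ ·)) (b : String) (hb : b ∈ r) :
    ∃ p ∈ (x :: r).zip r, pvLcpChars p.1.toList p.2.toList = pvLcpChars x.toList b.toList := by
  induction r generalizing x with
  | nil => simp at hb
  | cons z t ih =>
    rcases List.mem_cons.mp hb with hbz | hbt
    · subst hbz
      exact ⟨(x, b), by simp, rfl⟩
    · have hxz : x ≤ z := hx z List.mem_cons_self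
      have hzb : z ≤ b := List.rel_of_pairwise_cons hr hbt
      rcases lcp_three x.toList z.toList b.toList (str_le_lex x z hxz) (str_le_lex z b hzb) with h | h
      · exact ⟨(x, z), by simp, h.symm⟩
      · obtain ⟨p, hp, hpeq⟩ := ih z (fun y hy => List.rel_of_pairwise_cons hr hy)
          (List.pairwise_cons.mp hr).2 hbt
        refine ⟨p, ?_, hpeq.trans h.symm⟩
        cases t with
        | nil => simp at hbt
        | cons w u =>
          simp only [List.zip_cons_cons, List.mem_cons] at hp ⊢
          tauto

-- for any index-ordered pair (a,b) of a lex-sorted list, lcp a b appears among adjacent-pair lcps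
theorem chain_lemma (l : List String) (hl : l.Pairwise (· ≤ ·)) (a b : String)
    (hab : (a, b) ∈ pvPairs l) :
    ∃ p ∈ l.zip l.tail, pvLcpChars p.1.toList p.2.toList = pvLcpChars a.toList b.toList := by
  induction l with
  | nil => simp [pvPairs] at hab
  | cons x r ih =>
    have hr : r.Pairwise (· ≤ ·) := (List.pairwise_cons.mp hl).2
    rw [mem_pvPairs_cons] at hab
    rcases hab with ⟨rfl, hy⟩ | hab
    · simpa using chain_head a r (fun y hy => List.rel_of_pairwise_cons hl hy) hr b hy
    · obtain ⟨p, hp, hpeq⟩ := ih hr hab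
      refine ⟨p, ?_, hpeq⟩
      cases r with
      | nil => simp [pvPairs] at hab
      | cons z t =>
        simp only [List.tail_cons, List.zip_cons_cons, List.mem_cons] at hp ⊢
        tauto

-- the value A adds is the longest common prefix
theorem valA_eq (t1 t2 : String) :
    PySem.Str.slice t1 none (some (((pvLcpChars t1.toList t2.toList).length : Nat) : Int)) = pvLcp t1 t2 := by
  have h : (PySem.Str.slice t1 none (some (((pvLcpChars t1.toList t2.toList).length : Nat) : Int))).toList
      = pvLcpChars t1.toList t2.toList := by
    simp [PySem.Str.slice, PySem.List.slice_to_natCast, take_length_lcp]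
  have h2 := congrArg String.ofList h
  rwa [String.ofList_toList] at h2

-- the value B adds is the longest common prefix
theorem valB_eq (t1 t2 : String) :
    String.ofList (pvZipLcp (t1.toList.zip t2.toList)) = pvLcp t1 t2 := by
  simp [pvZipLcp_zip, pvLcp]

-- length of a pvLcp as Str.len
theorem len_pvLcp (t1 t2 : String) :
    PySem.Str.len (pvLcp t1 t2) = ((pvLcpChars t1.toList t2.toList).length : Int) := by
  simp [pvLcp, PySem.Str.len_eq]

-- flatten A's nested loops into a single fold over all index-ordered pairs
theorem foldA (g : String → String → List String → List String) (rest : List String) :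
    ∀ (pre : List String) (acc : List String),
    (PySem.List.enumerate rest (pre.length : Int)).foldl
        (fun acc p => (PySem.List.slice (pre ++ rest) (some (p.1 + 1)) none).foldl
          (fun a2 t2 => g p.2 t2 a2) acc) acc
      = (pvPairs rest).foldl (fun a2 q => g q.1 q.2 a2) acc := by
  induction rest with
  | nil => intro pre acc; simp [PySem.List.enumerate, pvPairs]
  | cons x r ih =>
    intro pre acc
    rw [PySem.List.enumerate_cons, List.foldl_cons]
    simp only
    have hcast : (pre.length : Int) + 1 = ((pre.length + 1 : Nat) : Int) := by push_cast; ring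
    have hdrop : (pre ++ x :: r).drop (pre.length + 1) = r := by
      have : pre ++ x :: r = (pre ++ [x]) ++ r := by simp
      rw [this]
      have hlen : (pre ++ [x]).length = pre.length + 1 := by simp
      rw [← hlen, List.drop_left]
    rw [hcast, PySem.List.slice_from_natCast, hdrop]
    have hassoc : pre ++ x :: r = (pre ++ [x]) ++ r := by simp
    have hlen : ((pre ++ [x]).length : Int) = (pre.length : Int) + 1 := by simp
    have := ih (pre ++ [x]) (r.foldl (fun a2 t2 => g x t2 a2) acc)
    rw [hlen, ← hassoc] at this
    rw [hcast] at this
    rw [this]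
    simp only [pvPairs, List.foldl_append, List.foldl_map]

-- ===== VERDICT (by name: the statement is the Claim_ definition above) =====
theorem find_common_prefixes_spec : Claim_equal_find_common_prefixes := by
  intro texts m _hDom hPre
  unfold Spec_find_common_prefixes
  by_cases h2 : texts.length < 2
  · simp [find_common_prefixes, find_common_prefixes_alt, h2]
  · simp only [find_common_prefixes, find_common_prefixes_alt, if_neg h2]
    rw [PySem.List.slice_from_one]
    -- flatten A's nested loops
    have hfoldA := foldA (fun t1 t2 acc =>
        let cl : Nat := pvCommonLen t1.toList t2.toList
        if m ≤ (cl : Int) then PySem.Set.add acc (PySem.Str.slice t1 none (some (cl : Int)))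
        else acc) texts [] PySem.Set.empty
    simp only [List.nil_append, List.length_nil, Nat.cast_zero] at hfoldA
    rw [hfoldA]
    -- the two prefix sets
    set ordered := PySem.List.sorted texts (fun s => s) false with hord_def
    set SA := (pvPairs texts).foldl (fun a2 q =>
        let cl : Nat := pvCommonLen q.1.toList q.2.toList
        if m ≤ (cl : Int) then PySem.Set.add a2 (PySem.Str.slice q.1 none (some (cl : Int)))
        else a2) PySem.Set.empty with hSA_def
    set SB := (ordered.zip ordered.tail).foldl (fun acc ab =>
        let p : String := String.ofList (pvZipLcp (ab.1.toList.zip ab.2.toList))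
        if m ≤ PySem.Str.len p then PySem.Set.add acc p else acc) PySem.Set.empty with hSB_def
    -- membership characterisations
    have hmemA : ∀ y, y ∈ SA ↔
        ∃ q ∈ pvPairs texts, m ≤ PySem.Str.len (pvLcp q.1 q.2) ∧ y = pvLcp q.1 q.2 := by
      intro y
      rw [hSA_def]
      rw [mem_foldl_add_if
        (fun q : String × String =>
          PySem.Str.slice q.1 none (some ((pvCommonLen q.1.toList q.2.toList : Nat) : Int)))
        (fun q : String × String => m ≤ ((pvCommonLen q.1.toList q.2.toList : Nat) : Int))
        (pvPairs texts) PySem.Set.empty y]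
      simp only [PySem.Set.empty]
      constructor
      · rintro (h | ⟨q, hq, hP, rfl⟩)
        · simp at h
        · refine ⟨q, hq, ?_, ?_⟩
          · rwa [pvCommonLen_eq_length, ← len_pvLcp] at hP
          · rw [pvCommonLen_eq_length, valA_eq]
      · rintro ⟨q, hq, hP, rfl⟩
        refine Or.inr ⟨q, hq, ?_, ?_⟩
        · rwa [pvCommonLen_eq_length, ← len_pvLcp]
        · rw [pvCommonLen_eq_length, valA_eq]
    have hmemB : ∀ y, y ∈ SB ↔
        ∃ p ∈ ordered.zip ordered.tail, m ≤ PySem.Str.len (pvLcp p.1 p.2) ∧ y = pvLcp p.1 p.2 := by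
      intro y
      rw [hSB_def]
      rw [mem_foldl_add_if
        (fun ab : String × String => String.ofList (pvZipLcp (ab.1.toList.zip ab.2.toList)))
        (fun ab : String × String =>
          m ≤ PySem.Str.len (String.ofList (pvZipLcp (ab.1.toList.zip ab.2.toList))))
        (ordered.zip ordered.tail) PySem.Set.empty y]
      simp only [PySem.Set.empty, valB_eq]
      constructor
      · rintro (h | ⟨p, hp, hP, rfl⟩)
        · simp at h
        · exact ⟨p, hp, hP, rfl⟩
      · rintro ⟨p, hp, hP, rfl⟩
        exact Or.inr ⟨p, hp, hP, rfl⟩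
    -- nodup
    have ndA : SA.Nodup := by
      rw [hSA_def]
      exact nodup_foldl_add_if _
        (fun q : String × String => m ≤ ((pvCommonLen q.1.toList q.2.toList : Nat) : Int)) _ _
        List.nodup_nil
    have ndB : SB.Nodup := by
      rw [hSB_def]
      exact nodup_foldl_add_if _
        (fun ab : String × String =>
          m ≤ PySem.Str.len (String.ofList (pvZipLcp (ab.1.toList.zip ab.2.toList)))) _ _
        List.nodup_nil
    -- the two sets have the same members
    have hperm_to : texts.Perm ordered := (PySem.List.sorted_perm texts (fun s => s) false).symm
    have hord : ordered.Pairwise (· ≤ ·) := by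
      simpa using PySem.List.sorted_pairwise texts (fun s => s)
    have hpvLcp_of_chars : ∀ (a b c d : String),
        pvLcpChars a.toList b.toList = pvLcpChars c.toList d.toList → pvLcp a b = pvLcp c d := by
      intro a b c d h
      simp [pvLcp, h]
    have hsame : ∀ y, y ∈ SA ↔ y ∈ SB := by
      intro y
      rw [hmemA, hmemB]
      constructor
      · rintro ⟨q, hq, hlen, rfl⟩
        rcases upair_perm hperm_to q.1 q.2 (Or.inl hq) with h1 | h1
        · obtain ⟨p, hp, heq⟩ := chain_lemma ordered hord q.1 q.2 h1
          have := hpvLcp_of_chars p.1 p.2 q.1 q.2 heq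
          exact ⟨p, hp, this ▸ hlen, this.symm⟩
        · obtain ⟨p, hp, heq⟩ := chain_lemma ordered hord q.2 q.1 h1
          have := hpvLcp_of_chars p.1 p.2 q.2 q.1 heq
          rw [pvLcp_comm q.2 q.1] at this
          exact ⟨p, hp, this ▸ hlen, this.symm⟩
      · rintro ⟨p, hp, hlen, rfl⟩
        have hpp := zip_tail_subset_pvPairs ordered p hp
        rcases upair_perm hperm_to.symm p.1 p.2 (Or.inl hpp) with h1 | h1
        · exact ⟨(p.1, p.2), h1, hlen, rfl⟩
        · refine ⟨(p.2, p.1), h1, ?_, ?_⟩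
          · rwa [pvLcp_comm p.2 p.1]
          · rw [pvLcp_comm p.2 p.1]
    have hpermAB : SA.Perm SB := (List.perm_ext_iff_of_nodup ndA ndB).mpr hsame
    -- A's reverse-sorted output is strictly decreasing in length (Pre_: no length ties), so it names B's too
    have hperm1 : (PySem.List.sorted SA (fun s => PySem.Str.len s) true).Perm SA :=
      PySem.List.sorted_perm SA (fun s => PySem.Str.len s) true
    have hpw : (PySem.List.sorted SA (fun s => PySem.Str.len s) true).Pairwise
        (fun a b => PySem.Str.len b ≤ PySem.Str.len a) :=
      PySem.List.sorted_pairwise_rev SA (fun s => PySem.Str.len s)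
    have ndLA : (PySem.List.sorted SA (fun s => PySem.Str.len s) true).Nodup :=
      hperm1.nodup_iff.mpr ndA
    have strict : (PySem.List.sorted SA (fun s => PySem.Str.len s) true).Pairwise
        (fun a b => PySem.Str.len b < PySem.Str.len a) := by
      refine (hpw.and ndLA).imp_of_mem ?_
      intro a b ha hb hab
      have haS : a ∈ SA := hperm1.subset ha
      have hbS : b ∈ SA := hperm1.subset hb
      obtain ⟨qa, hqa, hla, rfl⟩ := (hmemA a).mp haS
      obtain ⟨qb, hqb, hlb, rfl⟩ := (hmemA b).mp hbS
      refine lt_of_le_of_ne hab.1 ?_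
      intro hlen_eq
      exact hab.2 (hPre qa hqa qb hqb hla hlb hlen_eq.symm)
    exact (PySem.List.sorted_rev_eq_of_perm_of_pairwise_gt SB
      (PySem.List.sorted SA (fun s => PySem.Str.len s) true) (fun s => PySem.Str.len s)
      (hperm1.trans hpermAB) strict).symm
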